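-- pv_equiv track=rewrite | github.com/satoooon8888/NITIC_CTF_2_challanges | web/password/dist/server.py | fuzzy_equal
-- ===== SOURCE A (Python) =====
-- def fuzzy_equal(input_pass, password):
-- 	if len(input_pass) != len(password):
-- 		return False
--
-- 	for i in range(len(input_pass)):
-- 		if input_pass[i] in "0oO":
-- 			c = "0oO"
-- 		elif input_pass[i] in "l1I":
-- 			c = "l1I"
-- 		else:
-- 			c = input_pass[i]
-- 		if all([ci != password[i] for ci in c]):
-- 			return False
-- 	return True
-- ===== SOURCE B (Python) =====
-- _TABLE = str.maketrans({'0': '0', 'o': '0', 'O': '0', 'l': 'l', '1': 'l', 'I': 'l'})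
--
-- def fuzzy_equal(input_pass, password):
--     return input_pass.translate(_TABLE) == password.translate(_TABLE)
-- ===== Notes on version B (the rewrite author's own statement) =====
-- stated objective: idiomatic
-- what changed: Replaces the per-index classify-then-membership-scan loop (with an explicit length check) by a table-driven canonical normalization of both strings via str.translate followed by a single equality comparison.
import Mathlib
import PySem

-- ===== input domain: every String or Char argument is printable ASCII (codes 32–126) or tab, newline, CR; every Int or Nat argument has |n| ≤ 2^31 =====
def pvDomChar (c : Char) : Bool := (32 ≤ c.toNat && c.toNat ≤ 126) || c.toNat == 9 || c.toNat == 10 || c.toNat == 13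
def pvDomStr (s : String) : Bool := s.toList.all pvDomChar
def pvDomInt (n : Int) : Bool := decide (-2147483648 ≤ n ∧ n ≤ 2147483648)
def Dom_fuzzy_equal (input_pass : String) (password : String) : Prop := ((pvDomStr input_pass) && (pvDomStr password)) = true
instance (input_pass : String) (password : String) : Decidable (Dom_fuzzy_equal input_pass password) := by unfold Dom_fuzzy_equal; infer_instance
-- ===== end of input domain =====

-- B normalizes both strings through a translation table and compares once (idiomatic, same cost as A).

-- ===== PORT A =====
-- the per-index loop of A, walking both strings in step (indices are in range since lengths are equal)
def fuzzyLoop : List Char → List Char → Bool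
  | a :: as, b :: bs =>
    let c : List Char :=
      if a ∈ "0oO".toList then "0oO".toList
      else if a ∈ "l1I".toList then "l1I".toList
      else [a]
    if c.all (fun ci => ci ≠ b) then false
    else fuzzyLoop as bs
  | _, _ => true

def fuzzy_equal (input_pass : String) (password : String) : Bool :=
  if input_pass.toList.length ≠ password.toList.length then false
  else fuzzyLoop input_pass.toList password.toList

-- ===== PORT B =====
-- the translation table of Source B as a function: '0','o','O' → '0'; 'l','1','I' → 'l'; others unchanged
def pvNorm (c : Char) : Char :=
  if c = '0' ∨ c = 'o' ∨ c = 'O' then '0'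
  else if c = 'l' ∨ c = '1' ∨ c = 'I' then 'l'
  else c

def fuzzy_equal_alt (input_pass : String) (password : String) : Bool :=
  input_pass.toList.map pvNorm == password.toList.map pvNorm

-- ===== PRECONDITION & SPEC =====
def Spec_fuzzy_equal (input_pass : String) (password : String) (out : Bool) : Prop := out = fuzzy_equal_alt input_pass password
instance (input_pass : String) (password : String) (out : Bool) : Decidable (Spec_fuzzy_equal input_pass password out) := by unfold Spec_fuzzy_equal; infer_instance

-- ===== CLAIM (what is proved, stated in full; the proofs are below) =====
def Claim_equal_fuzzy_equal : Prop := ∀ (input_pass : String) (password : String), Dom_fuzzy_equal input_pass password → Spec_fuzzy_equal input_pass password (fuzzy_equal input_pass password)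

-- ===== LEMMAS AND PROOFS =====

-- A's per-character test succeeds exactly when the two characters have the same canonical form
theorem pvKey (a b : Char) :
    (if (if a ∈ "0oO".toList then "0oO".toList
         else if a ∈ "l1I".toList then "l1I".toList
         else [a]).all (fun ci => ci ≠ b) then false else true)
      = (pvNorm a == pvNorm b) := by
  have h0 : "0oO".toList = ['0', 'o', 'O'] := rfl
  have h1 : "l1I".toList = ['l', '1', 'I'] := rfl
  rw [h0, h1]
  by_cases hb0 : b = '0' ∨ b = 'o' ∨ b = 'O' <;>
  by_cases hb1 : b = 'l' ∨ b = '1' ∨ b = 'I' <;>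
  by_cases ha0 : a ∈ ['0', 'o', 'O'] <;>
  by_cases ha1 : a ∈ ['l', '1', 'I'] <;>
    simp_all [pvNorm, List.mem_cons] <;>
    first
    | (rcases ha0 with h | h | h <;> rcases hb1 with h' | h' | h' <;> simp_all)
    | (rcases ha1 with h | h | h <;> rcases hb0 with h' | h' | h' <;> simp_all)
    | (rcases ha0 with h | h | h <;> subst h <;> simp_all) <;> tauto
    | (rcases ha1 with h | h | h <;> subst h <;> simp_all) <;> tauto
    | (rcases hb0 with h | h | h <;> subst h <;> simp_all)
    | (rcases hb1 with h | h | h <;> subst h <;> simp_all)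
    | (obtain ⟨x, y, z⟩ := hb0;
       simp [show ¬('0' = b) from fun h => x h.symm,
             show ¬('o' = b) from fun h => y h.symm,
             show ¬('O' = b) from fun h => z h.symm])
    | (obtain ⟨x, y, z⟩ := hb1;
       simp [show ¬('l' = b) from fun h => x h.symm,
             show ¬('1' = b) from fun h => y h.symm,
             show ¬('I' = b) from fun h => z h.symm])
    | tauto

theorem pvLoop_eq : ∀ (as bs : List Char), as.length = bs.length →
    fuzzyLoop as bs = (as.map pvNorm == bs.map pvNorm) := by
  intro as
  induction as with
  | nil => intro bs h; cases bs <;> simp_all [fuzzyLoop]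
  | cons a as ih =>
    intro bs h
    cases bs with
    | nil => simp at h
    | cons b bs =>
      have hk := pvKey a b
      simp only [fuzzyLoop, List.map]
      by_cases hc : ((if a ∈ "0oO".toList then "0oO".toList
          else if a ∈ "l1I".toList then "l1I".toList
          else [a]).all (fun ci => ci ≠ b)) = true
      · simp only [hc, if_true] at hk ⊢
        have : (pvNorm a == pvNorm b) = false := hk.symm
        simp [List.cons_beq_cons, this]
      · have hc' : ((if a ∈ "0oO".toList then "0oO".toList
          else if a ∈ "l1I".toList then "l1I".toList
          else [a]).all (fun ci => ci ≠ b)) = false := by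
          simpa using hc
        simp only [hc', if_false, Bool.false_eq_true] at hk ⊢
        have hnb : (pvNorm a == pvNorm b) = true := hk.symm
        simp only [List.cons_beq_cons, hnb, Bool.true_and]
        exact ih bs (by simpa using h)

-- ===== VERDICT (by name: the statement is the Claim_ definition above) =====
theorem fuzzy_equal_spec : Claim_equal_fuzzy_equal := by
  intro ip pw _
  unfold Spec_fuzzy_equal fuzzy_equal fuzzy_equal_alt
  by_cases h : ip.toList.length = pw.toList.length
  · simp only [h, ne_eq, not_true_eq_false, if_false]
    exact pvLoop_eq _ _ h
  · simp only [ne_eq, h, not_false_eq_true, if_true]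
    have : (ip.toList.map pvNorm == pw.toList.map pvNorm) = false := by
      rw [beq_eq_false_iff_ne]
      intro he
      exact h (by simpa using congrArg List.length he)
    exact this.symm
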